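-- pv_equiv track=rewrite | github.com/Foundup/Foundups-Agent | reverse_log.py | parse_conversation_entries
-- ===== SOURCE A (Python) =====
-- from typing import List, Optional, Tuple
--
-- def parse_conversation_entries(lines: List[str]) -> List[List[str]]:
--     """
--     Parse conversation history into logical entries.
--
--     Args:
--         lines (List[str]): Raw lines from log file
--
--     Returns:
--         List[List[str]]: List of conversation entries
--     """
--     entries = []
--     current_entry = []
--     in_conversation = False
--
--     for line in lines:
--         stripped = line.strip()
--
--         # Skip empty lines at the start of entries
--         if not stripped and not current_entry:
--             continue
--
--         # Start new entry on speaker change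
--         if stripped.startswith(('You said:', 'ChatGPT said:')):
--             if current_entry:
--                 entries.append(current_entry)
--             current_entry = [line]
--             in_conversation = True
--         elif in_conversation and current_entry:
--             current_entry.append(line)
--
--     # Add last entry if exists
--     if current_entry:
--         entries.append(current_entry)
--
--     return entries
-- ===== SOURCE B (Python) =====
-- from typing import List
--
-- def parse_conversation_entries(lines: List[str]) -> List[List[str]]:
--     def is_boundary(line):
--         s = line.strip()
--         return s.startswith('You said:') or s.startswith('ChatGPT said:')
--
--     def split(rest):
--         # rest starts with a boundary line; take it plus following non-boundary
--         # lines as one entry, then recurse on the remainder.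
--         if not rest:
--             return []
--         body = [rest[0]]
--         i = 1
--         while i < len(rest) and not is_boundary(rest[i]):
--             body.append(rest[i])
--             i += 1
--         return [body] + split(rest[i:])
--
--     # drop everything before the first speaker boundary
--     k = 0
--     while k < len(lines) and not is_boundary(lines[k]):
--         k += 1
--     return split(lines[k:])
-- ===== Notes on version B (the rewrite author's own statement) =====
-- stated objective: alternative
-- what changed: Replaces A's single-pass state machine (entries/current_entry/in_conversation accumulators) with a recursive splitter: drop the prefix before the first speaker boundary, then repeatedly cut one entry = boundary line plus following non-boundary lines.
import Mathlib
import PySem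

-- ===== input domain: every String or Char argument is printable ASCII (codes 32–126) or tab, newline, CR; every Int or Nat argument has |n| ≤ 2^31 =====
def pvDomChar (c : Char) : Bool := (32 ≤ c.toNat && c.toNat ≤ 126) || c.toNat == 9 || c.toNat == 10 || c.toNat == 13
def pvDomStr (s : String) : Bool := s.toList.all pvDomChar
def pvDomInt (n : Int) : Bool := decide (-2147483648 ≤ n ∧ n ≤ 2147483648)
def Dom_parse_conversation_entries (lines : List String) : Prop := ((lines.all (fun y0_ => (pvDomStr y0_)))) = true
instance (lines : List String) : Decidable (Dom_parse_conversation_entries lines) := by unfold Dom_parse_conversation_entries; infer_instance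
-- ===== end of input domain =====

-- B replaces A's accumulator state machine by a recursive entry splitter; same values, same cost (objective: alternative).

-- ===== PORT A =====
def pvStepA (st : List (List String) × List String × Bool) (line : String) :
    List (List String) × List String × Bool :=
  let stripped := PySem.Str.strip line
  if stripped = "" ∧ st.2.1 = [] then st
  else if PySem.Str.startswith stripped "You said:" || PySem.Str.startswith stripped "ChatGPT said:" then
    ((if st.2.1 = [] then st.1 else st.1 ++ [st.2.1]), [line], true)
  else if st.2.2 ∧ st.2.1 ≠ [] then (st.1, st.2.1 ++ [line], st.2.2)
  else st

def parse_conversation_entries (lines : List String) : List (List String) :=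
  let fin := lines.foldl pvStepA ([], [], false)
  if fin.2.1 = [] then fin.1 else fin.1 ++ [fin.2.1]

-- ===== PORT B =====
def pvIsBoundary (line : String) : Bool :=
  let s := PySem.Str.strip line
  PySem.Str.startswith s "You said:" || PySem.Str.startswith s "ChatGPT said:"

-- the inner 'while i < len(rest) and not is_boundary' index loop is List.takeWhile / List.dropWhile
def pvSplit : List String → List (List String)
  | [] => []
  | x :: xs =>
      (x :: xs.takeWhile (fun l => !pvIsBoundary l)) :: pvSplit (xs.dropWhile (fun l => !pvIsBoundary l))
termination_by l => l.length
decreasing_by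
  simp only [List.length_cons]
  exact Nat.lt_succ_of_le (List.length_dropWhile_le _ xs)

def parse_conversation_entries_alt (lines : List String) : List (List String) :=
  pvSplit (lines.dropWhile (fun l => !pvIsBoundary l))

-- ===== PRECONDITION & SPEC =====
def Spec_parse_conversation_entries (lines : List String) (out : List (List String)) : Prop := out = parse_conversation_entries_alt lines
instance (lines : List String) (out : List (List String)) : Decidable (Spec_parse_conversation_entries lines out) := by unfold Spec_parse_conversation_entries; infer_instance

-- ===== CLAIM (what is proved, stated in full; the proofs are below) =====
def Claim_equal_parse_conversation_entries : Prop := ∀ (lines : List String), Dom_parse_conversation_entries lines → Spec_parse_conversation_entries lines (parse_conversation_entries lines)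

-- ===== LEMMAS AND PROOFS =====

theorem pvSplit_nil : pvSplit [] = [] := by rw [pvSplit]

theorem pvSplit_cons (x : String) (xs : List String) :
    pvSplit (x :: xs) =
      (x :: xs.takeWhile (fun l => !pvIsBoundary l)) :: pvSplit (xs.dropWhile (fun l => !pvIsBoundary l)) := by
  rw [pvSplit]

-- flush the final state
def pvFlush (st : List (List String) × List String × Bool) : List (List String) :=
  if st.2.1 = [] then st.1 else st.1 ++ [st.2.1]

-- once in conversation with a nonempty current entry, the tail is consumed entry-wise
theorem pvRun_inconv (rest : List String) (entries : List (List String)) (cur : List String)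
    (hcur : cur ≠ []) :
    pvFlush (rest.foldl pvStepA (entries, cur, true)) =
      entries ++ [cur ++ rest.takeWhile (fun l => !pvIsBoundary l)]
        ++ pvSplit (rest.dropWhile (fun l => !pvIsBoundary l)) := by
  induction rest generalizing entries cur with
  | nil => simp [pvFlush, hcur, pvSplit_nil]
  | cons l ls ih =>
    by_cases hb : pvIsBoundary l = true
    · have hstep : pvStepA (entries, cur, true) l = (entries ++ [cur], [l], true) := by
        simp only [pvStepA, pvIsBoundary] at hb ⊢
        split_ifs <;> simp_all [PySem.Chars.startswith]
      rw [List.foldl_cons, hstep, ih _ _ (by simp)]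
      simp [hb, pvSplit_cons]
    · have hstep : pvStepA (entries, cur, true) l = (entries, cur ++ [l], true) := by
        simp only [pvStepA, pvIsBoundary] at hb ⊢
        split_ifs <;> simp_all [PySem.Chars.startswith]
      rw [List.foldl_cons, hstep, ih _ _ (by simp)]
      simp [hb]

-- before the first boundary the state stays at the initial one
theorem pvRun_initial (lines : List String) :
    pvFlush (lines.foldl pvStepA ([], [], false)) =
      pvSplit (lines.dropWhile (fun l => !pvIsBoundary l)) := by
  induction lines with
  | nil => simp [pvFlush, pvSplit_nil]
  | cons l ls ih =>
    by_cases hb : pvIsBoundary l = true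
    · have hstep : pvStepA ([], [], false) l = ([], [l], true) := by
        simp only [pvStepA, pvIsBoundary] at hb ⊢
        split_ifs <;> simp_all [PySem.Chars.startswith]
      rw [List.foldl_cons, hstep, pvRun_inconv _ _ _ (by simp)]
      simp [hb, pvSplit_cons]
    · have hstep : pvStepA ([], [], false) l = ([], [], false) := by
        simp only [pvStepA, pvIsBoundary] at hb ⊢
        split_ifs <;> simp_all [PySem.Chars.startswith]
      rw [List.foldl_cons, hstep, ih]
      simp [hb]

-- ===== VERDICT (by name: the statement is the Claim_ definition above) =====
theorem parse_conversation_entries_spec : Claim_equal_parse_conversation_entries := by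
  intro lines _
  show parse_conversation_entries lines = parse_conversation_entries_alt lines
  simpa [parse_conversation_entries, pvFlush, parse_conversation_entries_alt] using pvRun_initial lines
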